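-- pv_equiv track=rewrite | github.com/liuyngchng/tetris | robot/ei_decimal.py | get_well_sums
-- ===== SOURCE A (Python) =====
-- def get_well_sums(board: list, num_columns: int) -> int:
--     """
--      A well is a sequence of empty cells above the top piece in a column such
--      that the top cell in the sequence is surrounded (left and right) by occupied
--      cells or a boundary of the board.
--
--      Args:
--         board - The game board (an array of integers)
--        num_columns - Number of columns in the board
--
--      Return:
--         The well sums. For a well of length n, we define the well sums as
--         1 + 2 + 3 + ... + n. This gives more significance to deeper holes.
--     """
--     well_sums = 0
--
--     # Check for well cells in the "inner columns" of the board.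
--     # "Inner columns" are the columns that aren't touching the edge of the board.
--     for i in range(1, num_columns - 1):  # ++i
--         for j in range(len(board) - 1, -1, -1):  # --j
--             if (((board[j] >> i) & 1) == 0) \
--                 and (((board[j] >> (i - 1)) & 1) == 1) \
--                 and (((board[j] >> (i + 1)) & 1) == 1):
--                 # Found well cell, count it + the number of empty cells below it.
--                 well_sums += 1
--
--                 for k in range(j - 1, -1, -1):  # --k
--                     # todo
--                     if (not (board[k] >> i) & 1 ) \
--                         and (board[k] >>(i - 1)) & 1 \
--                         and (board[k] >>(i + 1)) & 1:
--                         well_sums += 1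
--                     else:
--                         break
--
--     # Check for well cells in the leftmost column of the board.
--     for j in range(len(board) - 1, -1, -1):  # --j
--         if (not ((board[j] >> 0) & 1)) and ((board[j] >> 1) & 1):
--             # Found well cell, count it + the number of empty cells below it.
--             well_sums += 1
--             for k in range(j - 1, -1, -1):
--                 if not ((board[k] >> 0) & 1):
--                     well_sums += 1
--                 else:
--                     break
--
--     # Check for well cells in the rightmost column of the board.
--     for j in range(len(board) - 1, -1, -1):  # --j
--         if not ((board[j] >> (num_columns - 1)) & 1) \
--             and ((board[j] >> (num_columns - 2)) & 1):
--             # Found well cell, count it + the number of empty cells below it.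
--             well_sums += 1
--             for k in range(j - 1, -1, -1):  # --k
--                 if not (board[k]>> (num_columns - 1) & 1):
--                     well_sums += 1
--                 else:
--                     break
--     return well_sums
-- ===== SOURCE B (Python) =====
-- def get_well_sums(board: list, num_columns: int) -> int:
--     """Single bottom-up pass per column tracking the consecutive-empty run
--     length and adding the running length at each well cell."""
--     total = 0
--
--     # Inner columns: run counts consecutive well cells (empty with both
--     # neighbours occupied) from the bottom; each well cell contributes the
--     # current run length (1 + cells below it), i.e. triangular sums per run.
--     for i in range(1, num_columns - 1):
--         run = 0
--         for row in board:
--             if (row >> i) & 1 == 0 and (row >> (i - 1)) & 1 and (row >> (i + 1)) & 1: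
--                 run += 1
--                 total += run
--             else:
--                 run = 0
--
--     # Leftmost column: run counts consecutive empty cells in column 0; a cell
--     # counts (with its run) only when its right neighbour is occupied.
--     run = 0
--     for row in board:
--         if (row >> 0) & 1 == 0:
--             run += 1
--             if (row >> 1) & 1:
--                 total += run
--         else:
--             run = 0
--
--     # Rightmost column: symmetric.
--     run = 0
--     for row in board:
--         if (row >> (num_columns - 1)) & 1 == 0:
--             run += 1
--             if (row >> (num_columns - 2)) & 1:
--                 total += run
--         else:
--             run = 0
--
--     return total
-- ===== Notes on version B (the rewrite author's own statement) =====
-- stated objective: alternative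
-- what changed: Replaces A's top-down scan that re-counts the empty cells below every well cell with one bottom-up pass per column that maintains the consecutive-run length and adds it at each well cell.
import Mathlib
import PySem

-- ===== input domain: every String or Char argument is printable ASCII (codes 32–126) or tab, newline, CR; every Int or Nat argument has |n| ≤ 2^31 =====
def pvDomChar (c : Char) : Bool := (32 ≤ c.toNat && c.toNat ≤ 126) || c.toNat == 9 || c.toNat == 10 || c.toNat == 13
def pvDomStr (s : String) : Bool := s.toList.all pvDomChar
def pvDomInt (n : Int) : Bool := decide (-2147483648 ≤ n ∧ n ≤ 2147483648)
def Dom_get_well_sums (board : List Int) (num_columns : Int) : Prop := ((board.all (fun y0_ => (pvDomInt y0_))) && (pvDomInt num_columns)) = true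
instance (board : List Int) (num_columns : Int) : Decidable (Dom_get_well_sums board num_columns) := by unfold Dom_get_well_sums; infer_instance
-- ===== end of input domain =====

-- B replaces A's top-down rescan of the cells below each well cell with one
-- bottom-up run-length pass per column (a different, single-pass algorithm).


-- shared primitive: Python's ((n >> s) & 1)  (exact for s ≥ 0; Python raises for s < 0, excluded by Pre_)
def pybit (n : Int) (s : Int) : Int := PySem.Int.band (n >>> s.toNat) 1

-- ===== PORT A =====
-- inner `for k in range(j-1,-1,-1): … else break` of the inner-column loop
def aRunInner (board : List Int) (i : Int) : Nat → Int
  | 0 => 0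
  | k+1 =>
    if pybit (board.getD k 0) i = 0 ∧ pybit (board.getD k 0) (i-1) ≠ 0 ∧ pybit (board.getD k 0) (i+1) ≠ 0
    then 1 + aRunInner board i k else 0

-- `for j in range(len(board)-1,-1,-1)` of the inner-column loop (arg = j+1)
def aColInner (board : List Int) (i : Int) : Nat → Int
  | 0 => 0
  | j+1 =>
    (if pybit (board.getD j 0) i = 0 ∧ pybit (board.getD j 0) (i-1) = 1 ∧ pybit (board.getD j 0) (i+1) = 1
     then 1 + aRunInner board i j else 0) + aColInner board i j

def aRunLeft (board : List Int) : Nat → Int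
  | 0 => 0
  | k+1 => if pybit (board.getD k 0) 0 = 0 then 1 + aRunLeft board k else 0

def aColLeft (board : List Int) : Nat → Int
  | 0 => 0
  | j+1 =>
    (if pybit (board.getD j 0) 0 = 0 ∧ pybit (board.getD j 0) 1 ≠ 0
     then 1 + aRunLeft board j else 0) + aColLeft board j

def aRunRight (board : List Int) (nc : Int) : Nat → Int
  | 0 => 0
  | k+1 => if pybit (board.getD k 0) (nc-1) = 0 then 1 + aRunRight board nc k else 0

def aColRight (board : List Int) (nc : Int) : Nat → Int
  | 0 => 0
  | j+1 =>
    (if pybit (board.getD j 0) (nc-1) = 0 ∧ pybit (board.getD j 0) (nc-2) ≠ 0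
     then 1 + aRunRight board nc j else 0) + aColRight board nc j

def get_well_sums (board : List Int) (num_columns : Int) : Int :=
  let ws1 := (PySem.List.pyRange 1 (num_columns - 1) 1).foldl
      (fun acc i => acc + aColInner board i board.length) 0
  let ws2 := ws1 + aColLeft board board.length
  ws2 + aColRight board num_columns board.length

-- ===== PORT B =====
def get_well_sums_alt (board : List Int) (num_columns : Int) : Int :=
  let t1 := (PySem.List.pyRange 1 (num_columns - 1) 1).foldl
    (fun total i =>
      (board.foldl
        (fun s row =>
          if pybit row i = 0 ∧ pybit row (i-1) ≠ 0 ∧ pybit row (i+1) ≠ 0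
          then (s.1 + 1, s.2 + (s.1 + 1)) else (0, s.2))
        (0, total)).2) 0
  let t2 := (board.foldl
    (fun s row =>
      if pybit row 0 = 0
      then (s.1 + 1, if pybit row 1 ≠ 0 then s.2 + (s.1 + 1) else s.2)
      else (0, s.2)) (0, t1)).2
  (board.foldl
    (fun s row =>
      if pybit row (num_columns - 1) = 0
      then (s.1 + 1, if pybit row (num_columns - 2) ≠ 0 then s.2 + (s.1 + 1) else s.2)
      else (0, s.2)) (0, t2)).2

-- ===== PRECONDITION & SPEC =====
-- Exactly where Python A returns: with a nonempty board and num_columns ≤ 0, or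
-- num_columns = 1 and some even row, the rightmost-column test shifts by a
-- negative amount and A raises ValueError (B raises there too).
def Pre_get_well_sums (board : List Int) (num_columns : Int) : Prop :=
  board = [] ∨ 2 ≤ num_columns ∨ (num_columns = 1 ∧ ∀ r ∈ board, PySem.Int.mod r 2 = 1)

instance (board : List Int) (num_columns : Int) : Decidable (Pre_get_well_sums board num_columns) := by
  unfold Pre_get_well_sums; infer_instance

def pvWitness_get_well_sums : List Int × Int := ([5, 7, 2], 3)

def Spec_get_well_sums (board : List Int) (num_columns : Int) (out : Int) : Prop := out = get_well_sums_alt board num_columns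
instance (board : List Int) (num_columns : Int) (out : Int) : Decidable (Spec_get_well_sums board num_columns out) := by unfold Spec_get_well_sums; infer_instance

-- ===== CLAIM (what is proved, stated in full; the proofs are below) =====
def Claim_equal_get_well_sums : Prop := ∀ (board : List Int) (num_columns : Int), Dom_get_well_sums board num_columns → Pre_get_well_sums board num_columns → Spec_get_well_sums board num_columns (get_well_sums board num_columns)

-- ===== LEMMAS AND PROOFS =====

-- generic column machinery: e = "run continues" test, c = "count this cell" test, c ⊆ e
def gstep (e c : Int → Bool) (s : Int × Int) (row : Int) : Int × Int :=
  if e row then (s.1 + 1, if c row then s.2 + (s.1 + 1) else s.2) else (0, s.2)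

def grun (e : Int → Bool) (board : List Int) : Nat → Int
  | 0 => 0
  | k+1 => if e (board.getD k 0) then 1 + grun e board k else 0

def gsum (e c : Int → Bool) (board : List Int) : Nat → Int
  | 0 => 0
  | j+1 => (if c (board.getD j 0) then 1 + grun e board j else 0) + gsum e c board j

lemma gfold (e c : Int → Bool) (hce : ∀ r, c r = true → e r = true)
    (board : List Int) (t : Int) :
    ∀ n, n ≤ board.length →
      (board.take n).foldl (gstep e c) (0, t) = (grun e board n, t + gsum e c board n) := by
  intro n
  induction n with
  | zero => intro _; simp [grun, gsum]
  | succ n ih =>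
    intro h
    have hn : n < board.length := by omega
    have : board.take (n+1) = board.take n ++ [board.getD n 0] := by
      rw [List.take_add_one]
      simp [List.getD_eq_getElem?_getD, List.getElem?_eq_getElem hn]
    rw [this, List.foldl_append, ih (by omega)]
    simp only [List.foldl_cons, List.foldl_nil, gstep, grun, gsum]
    split_ifs with he hc hc
    · simp only [Prod.mk.injEq]; exact ⟨by ring, by ring⟩
    · simp only [Prod.mk.injEq]; exact ⟨by ring, by simp⟩
    · exact absurd (hce _ hc) he
    · simp

lemma gfold_full (e c : Int → Bool) (hce : ∀ r, c r = true → e r = true)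
    (board : List Int) (t : Int) :
    (board.foldl (gstep e c) (0, t)).2 = t + gsum e c board board.length := by
  have := gfold e c hce board t board.length (le_refl _)
  rw [List.take_length] at this
  rw [this]

-- pybit is always 0 or 1
lemma pybit_cases (n s : Int) : pybit n s = 0 ∨ pybit n s = 1 := by
  unfold pybit
  rw [PySem.Int.band_one]
  rcases Int.emod_two_eq_zero_or_one (n >>> s.toNat) with h | h <;>
    [left; right] <;>
    simpa [PySem.Int.mod_eq_emod_of_pos (by norm_num : (0:Int) < 2)] using h

-- A's inner-column loop equals gsum with e = c = the well condition
lemma aColInner_eq (board : List Int) (i : Int) :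
    ∀ n, aColInner board i n =
      gsum (fun r => decide (pybit r i = 0 ∧ pybit r (i-1) ≠ 0 ∧ pybit r (i+1) ≠ 0))
           (fun r => decide (pybit r i = 0 ∧ pybit r (i-1) ≠ 0 ∧ pybit r (i+1) ≠ 0)) board n := by
  have hrun : ∀ n, aRunInner board i n =
      grun (fun r => decide (pybit r i = 0 ∧ pybit r (i-1) ≠ 0 ∧ pybit r (i+1) ≠ 0)) board n := by
    intro n
    induction n with
    | zero => rfl
    | succ k ih => simp [aRunInner, grun, ih]
  intro n
  induction n with
  | zero => rfl
  | succ j ih =>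
    simp only [aColInner, gsum, ih, hrun]
    congr 1
    rcases pybit_cases (board[j]?.getD 0) (i-1) with h1 | h1 <;>
      rcases pybit_cases (board[j]?.getD 0) (i+1) with h2 | h2 <;>
      simp [h1, h2]

lemma aColLeft_eq (board : List Int) :
    ∀ n, aColLeft board n =
      gsum (fun r => decide (pybit r 0 = 0))
           (fun r => decide (pybit r 0 = 0 ∧ pybit r 1 ≠ 0)) board n := by
  have hrun : ∀ n, aRunLeft board n = grun (fun r => decide (pybit r 0 = 0)) board n := by
    intro n
    induction n with
    | zero => rfl
    | succ k ih => simp [aRunLeft, grun, ih]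
  intro n
  induction n with
  | zero => rfl
  | succ j ih => simp [aColLeft, gsum, ih, hrun]

lemma aColRight_eq (board : List Int) (nc : Int) :
    ∀ n, aColRight board nc n =
      gsum (fun r => decide (pybit r (nc-1) = 0))
           (fun r => decide (pybit r (nc-1) = 0 ∧ pybit r (nc-2) ≠ 0)) board n := by
  have hrun : ∀ n, aRunRight board nc n = grun (fun r => decide (pybit r (nc-1) = 0)) board n := by
    intro n
    induction n with
    | zero => rfl
    | succ k ih => simp [aRunRight, grun, ih]
  intro n
  induction n with
  | zero => rfl
  | succ j ih => simp [aColRight, gsum, ih, hrun]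

-- B's concrete step functions are gstep instances
lemma stepInner_eq (i : Int) :
    (fun (s : Int × Int) (row : Int) =>
      if pybit row i = 0 ∧ pybit row (i-1) ≠ 0 ∧ pybit row (i+1) ≠ 0
      then (s.1 + 1, s.2 + (s.1 + 1)) else (0, s.2)) =
    gstep (fun r => decide (pybit r i = 0 ∧ pybit r (i-1) ≠ 0 ∧ pybit r (i+1) ≠ 0))
          (fun r => decide (pybit r i = 0 ∧ pybit r (i-1) ≠ 0 ∧ pybit r (i+1) ≠ 0)) := by
  funext s row
  simp only [gstep, decide_eq_true_eq]
  split_ifs <;> simp_all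

lemma stepLeft_eq :
    (fun (s : Int × Int) (row : Int) =>
      if pybit row 0 = 0
      then (s.1 + 1, if pybit row 1 ≠ 0 then s.2 + (s.1 + 1) else s.2)
      else (0, s.2)) =
    gstep (fun r => decide (pybit r 0 = 0))
          (fun r => decide (pybit r 0 = 0 ∧ pybit r 1 ≠ 0)) := by
  funext s row
  simp only [gstep, decide_eq_true_eq]
  split_ifs <;> simp_all

lemma stepRight_eq (nc : Int) :
    (fun (s : Int × Int) (row : Int) =>
      if pybit row (nc-1) = 0
      then (s.1 + 1, if pybit row (nc-2) ≠ 0 then s.2 + (s.1 + 1) else s.2)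
      else (0, s.2)) =
    gstep (fun r => decide (pybit r (nc-1) = 0))
          (fun r => decide (pybit r (nc-1) = 0 ∧ pybit r (nc-2) ≠ 0)) := by
  funext s row
  simp only [gstep, decide_eq_true_eq]
  split_ifs <;> simp_all

-- B's outer fold over the column range, with the accumulator threaded through,
-- equals A's accumulator-plus-column-value fold
lemma range_fold_eq (board : List Int) (l : List Int) :
    ∀ t : Int,
      l.foldl (fun total i =>
        (board.foldl
          (fun s row =>
            if pybit row i = 0 ∧ pybit row (i-1) ≠ 0 ∧ pybit row (i+1) ≠ 0
            then (s.1 + 1, s.2 + (s.1 + 1)) else (0, s.2)) (0, total)).2) t =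
      t + l.foldl (fun acc i => acc + aColInner board i board.length) 0 := by
  induction l with
  | nil => intro t; simp
  | cons i l ih =>
    intro t
    simp only [List.foldl_cons]
    rw [ih, stepInner_eq i,
        gfold_full _ _ (fun r h => h) board t,
        aColInner_eq,
        PySem.List.foldl_add (g := fun x => aColInner board x board.length) (a := (0:Int)),
        PySem.List.foldl_add (g := fun x => aColInner board x board.length)]
    ring

theorem get_well_sums_eq_alt (board : List Int) (num_columns : Int) :
    get_well_sums board num_columns = get_well_sums_alt board num_columns := by
  unfold get_well_sums get_well_sums_alt
  rw [stepLeft_eq, stepRight_eq,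
      gfold_full _ _ (fun r h => by simpa using (of_decide_eq_true h).1) board,
      gfold_full _ _ (fun r h => by simpa using (of_decide_eq_true h).1) board,
      range_fold_eq, aColLeft_eq, aColRight_eq]
  ring

-- ===== VERDICT (by name: the statement is the Claim_ definition above) =====
theorem get_well_sums_spec : Claim_equal_get_well_sums := by
  intro board num_columns _ _
  unfold Spec_get_well_sums
  exact get_well_sums_eq_alt board num_columns
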